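-- pv_equiv track=rewrite | github.com/njonas94/Algo_1_Guarna_1C2022 | TP_Parte_1/fiuble_con_paquetes/validacion.py | validar_usuario
-- ===== SOURCE A (Python) =====
-- def validar_usuario(usuario):
--     '''
--     Funcion: validar_usuario
--     Parámetros:
--         usuario: variable de tipo string, nombre del jugador
--     Descripcion:
--         Corrobora si el usuario es valido para registrarse
--     Salida:
--         Devuelve la el estado del usuario, valida o invalida
--     '''
--     condiciones_cumplidas=0
--     cantidad_letras=0
--     cantidad_numeros=0
--     cantidad_guion_bajo=0
--     cantidad_especiales=0
--     posicion=0
--     if 4<=len(usuario)<=15 and "_" in usuario: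
--         condiciones_cumplidas+=2
--         while posicion<len(usuario) and (2<=condiciones_cumplidas<=4 and cantidad_especiales==0):
--             if usuario[posicion].isalpha() and cantidad_letras==0:
--                 condiciones_cumplidas+=1
--                 cantidad_letras+=1
--
--             elif usuario[posicion].isnumeric() and cantidad_numeros==0:
--                 condiciones_cumplidas+=1
--                 cantidad_numeros+=1
--
--             elif not usuario[posicion].isalnum() and usuario[posicion]!='_' and cantidad_especiales==0 :
--                 cantidad_especiales+=1
--             posicion+=1
--
--     if condiciones_cumplidas==4 and cantidad_especiales==0:
--         estado='valido'
--     else: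
--         estado='invalido'
--
--     return estado
-- ===== SOURCE B (Python) =====
-- def validar_usuario(usuario):
--     '''Simpler re-implementation: one boolean conjunction of independent checks
--     instead of a stateful counter loop with early exit.'''
--     ok = (4 <= len(usuario) <= 15
--           and '_' in usuario
--           and any(c.isalpha() for c in usuario)
--           and any(c.isnumeric() and not c.isalpha() for c in usuario)
--           and all(c.isalnum() or c == '_' for c in usuario))
--     return 'valido' if ok else 'invalido'
-- ===== Notes on version B (the rewrite author's own statement) =====
-- stated objective: simpler
-- what changed: Replaces A's single stateful scan (mutable condition counters with an early-exit while loop and an elif chain) by a plain conjunction of independent whole-string checks (length bound, underscore present, has a letter, has a digit, only alphanumerics or underscore).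
import Mathlib
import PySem

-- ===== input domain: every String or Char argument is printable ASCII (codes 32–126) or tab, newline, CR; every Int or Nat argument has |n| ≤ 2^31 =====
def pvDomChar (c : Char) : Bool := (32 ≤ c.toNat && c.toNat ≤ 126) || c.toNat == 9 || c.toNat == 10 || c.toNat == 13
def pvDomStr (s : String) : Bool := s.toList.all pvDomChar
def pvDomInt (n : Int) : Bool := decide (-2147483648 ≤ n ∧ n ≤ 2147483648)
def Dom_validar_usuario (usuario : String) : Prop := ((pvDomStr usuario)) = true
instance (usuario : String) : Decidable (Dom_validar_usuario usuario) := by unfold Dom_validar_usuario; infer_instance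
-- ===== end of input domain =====

-- B replaces A's stateful counter loop by one conjunction of independent whole-string checks (simpler; same O(n) cost).

-- ===== PORT A =====
-- A's while loop, step for step: state (posicion via the remaining chars, condiciones_cumplidas,
-- cantidad_letras, cantidad_numeros, cantidad_especiales); returns the final (condiciones, especiales).
-- Python's c.isnumeric() is ported as PySem.Chars.isdigit, exact on the stated ASCII domain.
def vuLoop : List Char → Int → Int → Int → Int → Int × Int
  | [], cond, _, _, esp => (cond, esp)
  | c :: rest, cond, letras, numeros, esp =>
    if 2 ≤ cond ∧ cond ≤ 4 ∧ esp = 0 then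
      if PySem.Chars.isalpha c && (letras == 0) then
        vuLoop rest (cond + 1) (letras + 1) numeros esp
      else if PySem.Chars.isdigit c && (numeros == 0) then
        vuLoop rest (cond + 1) letras (numeros + 1) esp
      else if !PySem.Chars.isalnum c && (c != '_') && (esp == 0) then
        vuLoop rest cond letras numeros (esp + 1)
      else
        vuLoop rest cond letras numeros esp
    else (cond, esp)

def validar_usuario (usuario : String) : String :=
  let r : Int × Int :=
    if 4 ≤ PySem.Str.len usuario ∧ PySem.Str.len usuario ≤ 15 ∧ PySem.Str.isIn "_" usuario = true then
      vuLoop usuario.toList 2 0 0 0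
    else (0, 0)
  if r.1 = 4 ∧ r.2 = 0 then "valido" else "invalido"

-- ===== PORT B =====
-- Source B's conjunction of checks; c.isnumeric() and not c.isalpha() ported with PySem.Chars.isdigit
-- (exact on the stated ASCII domain).
def validar_usuario_alt (usuario : String) : String :=
  if 4 ≤ PySem.Str.len usuario ∧ PySem.Str.len usuario ≤ 15
     ∧ PySem.Str.isIn "_" usuario = true
     ∧ usuario.toList.any (fun c => PySem.Chars.isalpha c) = true
     ∧ usuario.toList.any (fun c => PySem.Chars.isdigit c && !PySem.Chars.isalpha c) = true
     ∧ usuario.toList.all (fun c => PySem.Chars.isalnum c || c == '_') = true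
  then "valido" else "invalido"

-- ===== PRECONDITION & SPEC =====
def Spec_validar_usuario (usuario : String) (out : String) : Prop := out = validar_usuario_alt usuario
instance (usuario : String) (out : String) : Decidable (Spec_validar_usuario usuario out) := by unfold Spec_validar_usuario; infer_instance

-- ===== CLAIM (what is proved, stated in full; the proofs are below) =====
def Claim_equal_validar_usuario : Prop := ∀ (usuario : String), Dom_validar_usuario usuario → Spec_validar_usuario usuario (validar_usuario usuario)

-- ===== LEMMAS AND PROOFS =====

-- character-class facts (hold for every Char under PySem's definitions)
theorem isalpha_isdigit_false (c : Char) (ha : PySem.Chars.isalpha c = true) :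
    PySem.Chars.isdigit c = false := by
  simp only [PySem.Chars.isalpha, PySem.Chars.isdigit, PySem.Chars.isupper, PySem.Chars.islower,
    Bool.or_eq_true, Bool.and_eq_true, decide_eq_true_eq, Char.le_def, UInt32.le_iff_toNat_le,
    Bool.and_eq_false_iff, decide_eq_false_iff_not, not_le] at *
  have h1 : ('0' : Char).val.toNat = 48 := by decide
  have h2 : ('9' : Char).val.toNat = 57 := by decide
  have h3 : ('A' : Char).val.toNat = 65 := by decide
  have h4 : ('Z' : Char).val.toNat = 90 := by decide
  have h5 : ('a' : Char).val.toNat = 97 := by decide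
  have h6 : ('z' : Char).val.toNat = 122 := by decide
  omega

theorem isalpha_isalnum (c : Char) (ha : PySem.Chars.isalpha c = true) :
    PySem.Chars.isalnum c = true := by
  simp only [PySem.Chars.isalnum, Bool.or_eq_true] at *; tauto

theorem isdigit_isalnum (c : Char) (ha : PySem.Chars.isdigit c = true) :
    PySem.Chars.isalnum c = true := by
  simp only [PySem.Chars.isalnum, Bool.or_eq_true] at *; tauto

theorem isalnum_cases (c : Char) (ha : PySem.Chars.isalnum c = true) :
    PySem.Chars.isalpha c = true ∨ PySem.Chars.isdigit c = true := by
  simp only [PySem.Chars.isalnum, Bool.or_eq_true] at *; tauto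

-- B's digit predicate coincides with plain isdigit (alpha and digit are disjoint)
theorem digit_pred_eq (c : Char) :
    (PySem.Chars.isdigit c && !PySem.Chars.isalpha c) = PySem.Chars.isdigit c := by
  by_cases ha : PySem.Chars.isalpha c = true
  · simp [isalpha_isdigit_false c ha]
  · simp [Bool.eq_false_iff.mpr ha]

-- once a special character is seen (especiales = 1) the loop exits immediately
theorem vuLoop_esp_one (cs : List Char) (cond letras numeros : Int) :
    vuLoop cs cond letras numeros 1 = (cond, 1) := by
  cases cs with
  | nil => rfl
  | cons c rest => simp [vuLoop]

-- one unfolding step of the loop while no special character has been seen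
theorem vuLoop_cons (c : Char) (rest : List Char) (cond l n : Int)
    (h : 2 ≤ cond ∧ cond ≤ 4) :
    vuLoop (c :: rest) cond l n 0 =
      if PySem.Chars.isalpha c && (l == 0) then vuLoop rest (cond + 1) (l + 1) n 0
      else if PySem.Chars.isdigit c && (n == 0) then vuLoop rest (cond + 1) l (n + 1) 0
      else if !PySem.Chars.isalnum c && (c != '_') then vuLoop rest cond l n 1
      else vuLoop rest cond l n 0 := by
  show (if 2 ≤ cond ∧ cond ≤ 4 ∧ (0 : Int) = 0 then
          if PySem.Chars.isalpha c && (l == 0) then vuLoop rest (cond + 1) (l + 1) n 0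
          else if PySem.Chars.isdigit c && (n == 0) then vuLoop rest (cond + 1) l (n + 1) 0
          else if !PySem.Chars.isalnum c && (c != '_') && (((0 : Int)) == 0) then vuLoop rest cond l n 1
          else vuLoop rest cond l n 0
        else (cond, 0)) = _
  rw [if_pos ⟨h.1, h.2, rfl⟩]
  norm_num

-- characterisation of A's loop outcome as B's whole-string checks
theorem vuLoop_iff (cs : List Char) (l n : Int) (hl : l = 0 ∨ l = 1) (hn : n = 0 ∨ n = 1) :
    ((vuLoop cs (2 + l + n) l n 0).1 = 4 ∧ (vuLoop cs (2 + l + n) l n 0).2 = 0) ↔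
      ((l = 1 ∨ cs.any (fun c => PySem.Chars.isalpha c) = true)
        ∧ (n = 1 ∨ cs.any (fun c => PySem.Chars.isdigit c) = true)
        ∧ cs.all (fun c => PySem.Chars.isalnum c || c == '_') = true) := by
  induction cs generalizing l n with
  | nil =>
    show ((2 + l + n = 4 ∧ (0 : Int) = 0) ↔ _)
    simp only [List.any_nil, List.all_nil]
    constructor
    · rintro ⟨h4, -⟩
      exact ⟨Or.inl (by omega), Or.inl (by omega), trivial⟩
    · rintro ⟨h1, h2, -⟩
      have hl1 : l = 1 := h1.resolve_right (by simp)
      have hn1 : n = 1 := h2.resolve_right (by simp)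
      exact ⟨by omega, trivial⟩
  | cons c rest ih =>
    rw [vuLoop_cons c rest (2 + l + n) l n (by omega)]
    by_cases ha : PySem.Chars.isalpha c = true
    · have hd : PySem.Chars.isdigit c = false := isalpha_isdigit_false c ha
      have han : PySem.Chars.isalnum c = true := isalpha_isalnum c ha
      rcases hl with hl0 | hl1
      · -- first letter: branch 1
        subst hl0
        rw [if_pos (by simp [ha])]
        rw [show (2 : Int) + 0 + n + 1 = 2 + 1 + n by ring,
            show (0 : Int) + 1 = 1 by ring]
        rw [ih 1 n (Or.inr rfl) hn]
        simp [ha, hd, han]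
      · -- a letter was already counted: else branch
        subst hl1
        rw [if_neg (by simp), if_neg (by simp [hd]), if_neg (by simp [han])]
        rw [ih 1 n (Or.inr rfl) hn]
        simp [ha, hd, han]
    · have ha' : PySem.Chars.isalpha c = false := Bool.eq_false_iff.mpr ha
      by_cases hd : PySem.Chars.isdigit c = true
      · have han : PySem.Chars.isalnum c = true := isdigit_isalnum c hd
        rcases hn with hn0 | hn1
        · -- first number: branch 2
          subst hn0
          rw [if_neg (by simp [ha']), if_pos (by simp [hd])]
          rw [show (2 : Int) + l + 0 + 1 = 2 + l + 1 by ring,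
              show (0 : Int) + 1 = 1 by ring]
          rw [ih l 1 hl (Or.inr rfl)]
          simp [ha', hd, han]
        · -- a number was already counted: else branch
          subst hn1
          rw [if_neg (by simp [ha']), if_neg (by simp), if_neg (by simp [han])]
          rw [ih l 1 hl (Or.inr rfl)]
          simp [ha', hd, han]
      · have hd' : PySem.Chars.isdigit c = false := Bool.eq_false_iff.mpr hd
        have han : PySem.Chars.isalnum c = false := by
          cases h : PySem.Chars.isalnum c
          · rfl
          · rcases isalnum_cases c h with h1 | h1
            · exact absurd h1 ha
            · exact absurd h1 hd
        by_cases hu : c = '_'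
        · -- underscore: no branch fires, plain advance
          subst hu
          rw [if_neg (by simp [ha']), if_neg (by simp [hd']), if_neg (by simp)]
          rw [ih l n hl hn]
          simp [ha', hd', han]
        · -- special character: branch 3, then the loop exits
          rw [if_neg (by simp [ha']), if_neg (by simp [hd']),
              if_pos (by simp [han, hu]), vuLoop_esp_one]
          simp only [List.any_cons, List.all_cons, ha', hd', han,
            beq_eq_false_iff_ne.mpr hu, Bool.false_or, Bool.or_self, Bool.false_and]
          constructor
          · rintro ⟨-, h⟩; exact absurd h (by norm_num)
          · rintro ⟨-, -, h⟩; exact absurd h (by simp)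

-- ===== VERDICT (by name: the statement is the Claim_ definition above) =====
theorem validar_usuario_spec : Claim_equal_validar_usuario := by
  intro usuario _
  unfold Spec_validar_usuario validar_usuario validar_usuario_alt
  by_cases hout : 4 ≤ PySem.Str.len usuario ∧ PySem.Str.len usuario ≤ 15
      ∧ PySem.Str.isIn "_" usuario = true
  · rw [if_pos hout]
    obtain ⟨h1, h2, h3⟩ := hout
    have key := vuLoop_iff usuario.toList 0 0 (Or.inl rfl) (Or.inl rfl)
    rw [show (2 : Int) + 0 + 0 = 2 by ring] at key
    have hdig : usuario.toList.any (fun c => PySem.Chars.isdigit c && !PySem.Chars.isalpha c)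
        = usuario.toList.any (fun c => PySem.Chars.isdigit c) := by
      simp only [digit_pred_eq]
    by_cases hv : (vuLoop usuario.toList 2 0 0 0).1 = 4 ∧ (vuLoop usuario.toList 2 0 0 0).2 = 0
    · rw [if_pos hv, if_pos]
      obtain ⟨hA, hB, hC⟩ := key.mp hv
      exact ⟨h1, h2, h3, hA.resolve_left (by norm_num),
        hdig.symm ▸ hB.resolve_left (by norm_num), hC⟩
    · rw [if_neg hv, if_neg]
      rintro ⟨-, -, -, hA, hB, hC⟩
      exact hv (key.mpr ⟨Or.inr hA, Or.inr (hdig ▸ hB), hC⟩)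
  · rw [if_neg hout]
    rw [if_neg (by norm_num : ¬(((0, 0) : Int × Int).1 = 4 ∧ ((0, 0) : Int × Int).2 = 0))]
    rw [if_neg (fun h => hout ⟨h.1, h.2.1, h.2.2.1⟩)]
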